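-- pv_equiv track=rewrite | github.com/asbhosekar/neuropatient-tracker-crew-ai | src/agents/neurologist.py | get_workup_recommendations
-- ===== SOURCE A (Python) =====
-- def get_workup_recommendations(symptoms: list[str]) -> dict:
--     """
--     Recommend diagnostic workup based on presenting symptoms.
--
--     Args:
--         symptoms: List of presenting symptoms
--
--     Returns:
--         Dictionary with recommended tests and imaging
--     """
--     workup = {
--         "laboratory": [],
--         "imaging": [],
--         "neurophysiology": [],
--         "other": [],
--     }
--
--     workup["laboratory"] = [
--         "Complete blood count (CBC)",
--         "Comprehensive metabolic panel",
--         "Thyroid function tests",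
--         "Vitamin B12 level",
--     ]
--
--     symptom_lower = [s.lower() for s in symptoms]
--
--     if any("seizure" in s or "epilepsy" in s for s in symptom_lower):
--         workup["imaging"].append("MRI Brain with epilepsy protocol")
--         workup["neurophysiology"].append("EEG (routine and/or prolonged)")
--         workup["laboratory"].extend(["Antiepileptic drug levels", "Prolactin (post-ictal)"])
--
--     if any("headache" in s or "migraine" in s for s in symptom_lower):
--         workup["imaging"].append("MRI Brain with/without contrast")
--         workup["other"].append("Headache diary review")
--
--     if any("tremor" in s or "parkinson" in s for s in symptom_lower):
--         workup["imaging"].append("MRI Brain")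
--         workup["imaging"].append("DaTscan (if diagnostic uncertainty)")
--
--     if any("memory" in s or "cognitive" in s or "dementia" in s for s in symptom_lower):
--         workup["imaging"].append("MRI Brain with volumetric analysis")
--         workup["neurophysiology"].append("Neuropsychological testing")
--         workup["laboratory"].extend(["RPR/VDRL", "HIV testing"])
--
--     if any("weakness" in s or "numbness" in s or "neuropathy" in s for s in symptom_lower):
--         workup["neurophysiology"].append("EMG/Nerve conduction studies")
--         workup["laboratory"].extend(["HbA1c", "SPEP/UPEP"])
--
--     return workup
-- ===== SOURCE B (Python) =====
-- # B: single-pass scan building a set of fired rule ids from a flat keyword table,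
-- # then each category is a filtered comprehension over a (rule, item) table. Objective: alternative.
--
-- _KEYWORD_RULES = [
--     ("seizure", 0), ("epilepsy", 0),
--     ("headache", 1), ("migraine", 1),
--     ("tremor", 2), ("parkinson", 2),
--     ("memory", 3), ("cognitive", 3), ("dementia", 3),
--     ("weakness", 4), ("numbness", 4), ("neuropathy", 4),
-- ]
--
-- _LAB_TESTS = [(0, "Antiepileptic drug levels"), (0, "Prolactin (post-ictal)"),
--               (3, "RPR/VDRL"), (3, "HIV testing"),
--               (4, "HbA1c"), (4, "SPEP/UPEP")]
-- _IMAGING = [(0, "MRI Brain with epilepsy protocol"),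
--             (1, "MRI Brain with/without contrast"),
--             (2, "MRI Brain"), (2, "DaTscan (if diagnostic uncertainty)"),
--             (3, "MRI Brain with volumetric analysis")]
-- _NEURO = [(0, "EEG (routine and/or prolonged)"),
--           (3, "Neuropsychological testing"),
--           (4, "EMG/Nerve conduction studies")]
-- _OTHER = [(1, "Headache diary review")]
--
--
-- def _fired(symptoms):
--     return {rule for s in symptoms
--             for kw, rule in _KEYWORD_RULES if kw in s.lower()}
--
--
-- def get_workup_recommendations(symptoms: list[str]) -> dict:
--     fired = _fired(symptoms)
--
--     def pick(table):
--         return [item for rule, item in table if rule in fired]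
--
--     return {
--         "laboratory": ["Complete blood count (CBC)", "Comprehensive metabolic panel",
--                        "Thyroid function tests", "Vitamin B12 level"] + pick(_LAB_TESTS),
--         "imaging": pick(_IMAGING),
--         "neurophysiology": pick(_NEURO),
--         "other": pick(_OTHER),
--     }
-- ===== Notes on version B (the rewrite author's own statement) =====
-- stated objective: alternative
-- what changed: Instead of five per-rule any()-scans mutating a dict in place, B makes one pass over the symptoms building the set of fired rule ids from a flat keyword->rule table, then produces each category as a filtered comprehension over a static (rule, item) table.
import Mathlib
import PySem

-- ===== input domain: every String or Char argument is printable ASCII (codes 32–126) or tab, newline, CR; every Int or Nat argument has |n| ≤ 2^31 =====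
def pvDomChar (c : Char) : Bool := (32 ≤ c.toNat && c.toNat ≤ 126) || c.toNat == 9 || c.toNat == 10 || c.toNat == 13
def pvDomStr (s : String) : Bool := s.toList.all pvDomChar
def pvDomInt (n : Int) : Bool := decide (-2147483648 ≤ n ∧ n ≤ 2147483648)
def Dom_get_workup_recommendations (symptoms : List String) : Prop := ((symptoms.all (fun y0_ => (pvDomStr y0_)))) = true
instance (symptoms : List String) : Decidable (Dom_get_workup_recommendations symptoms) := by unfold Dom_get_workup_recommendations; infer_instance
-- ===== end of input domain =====

-- B replaces A's five per-rule any()-scans and in-place dict mutation by one pass building the set of fired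
-- rule ids from a flat keyword table, then filtering static (rule, item) tables per category; objective: alternative.

-- ===== PORT A =====
-- dict-of-lists mutation d[k].append/extend is ported as Dict.modify d k [] (· ++ items); exact here since every
-- touched key is present from initialisation (Python would raise KeyError only on a missing key, which cannot occur).
def get_workup_recommendations (symptoms : List String) : List (String × List String) :=
  let workup : PySem.Dict String (List String) :=
    (((PySem.Dict.empty.insert "laboratory" []).insert "imaging" []).insert "neurophysiology" []).insert "other" []
  let workup := workup.insert "laboratory"
    ["Complete blood count (CBC)", "Comprehensive metabolic panel",
     "Thyroid function tests", "Vitamin B12 level"]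
  let symptom_lower := symptoms.map (fun s => PySem.Str.lower s)
  let workup :=
    if symptom_lower.any (fun s => PySem.Str.isIn "seizure" s || PySem.Str.isIn "epilepsy" s) then
      let workup := workup.modify "imaging" [] (fun l => l ++ ["MRI Brain with epilepsy protocol"])
      let workup := workup.modify "neurophysiology" [] (fun l => l ++ ["EEG (routine and/or prolonged)"])
      workup.modify "laboratory" [] (fun l => l ++ ["Antiepileptic drug levels", "Prolactin (post-ictal)"])
    else workup
  let workup :=
    if symptom_lower.any (fun s => PySem.Str.isIn "headache" s || PySem.Str.isIn "migraine" s) then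
      let workup := workup.modify "imaging" [] (fun l => l ++ ["MRI Brain with/without contrast"])
      workup.modify "other" [] (fun l => l ++ ["Headache diary review"])
    else workup
  let workup :=
    if symptom_lower.any (fun s => PySem.Str.isIn "tremor" s || PySem.Str.isIn "parkinson" s) then
      let workup := workup.modify "imaging" [] (fun l => l ++ ["MRI Brain"])
      workup.modify "imaging" [] (fun l => l ++ ["DaTscan (if diagnostic uncertainty)"])
    else workup
  let workup :=
    if symptom_lower.any (fun s => PySem.Str.isIn "memory" s || (PySem.Str.isIn "cognitive" s || PySem.Str.isIn "dementia" s)) then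
      let workup := workup.modify "imaging" [] (fun l => l ++ ["MRI Brain with volumetric analysis"])
      let workup := workup.modify "neurophysiology" [] (fun l => l ++ ["Neuropsychological testing"])
      workup.modify "laboratory" [] (fun l => l ++ ["RPR/VDRL", "HIV testing"])
    else workup
  let workup :=
    if symptom_lower.any (fun s => PySem.Str.isIn "weakness" s || (PySem.Str.isIn "numbness" s || PySem.Str.isIn "neuropathy" s)) then
      let workup := workup.modify "neurophysiology" [] (fun l => l ++ ["EMG/Nerve conduction studies"])
      workup.modify "laboratory" [] (fun l => l ++ ["HbA1c", "SPEP/UPEP"])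
    else workup
  workup.items

-- ===== PORT B =====
def pvKeywordRules : List (String × Nat) :=
  [("seizure", 0), ("epilepsy", 0),
   ("headache", 1), ("migraine", 1),
   ("tremor", 2), ("parkinson", 2),
   ("memory", 3), ("cognitive", 3), ("dementia", 3),
   ("weakness", 4), ("numbness", 4), ("neuropathy", 4)]

def pvLabTests : List (Nat × String) :=
  [(0, "Antiepileptic drug levels"), (0, "Prolactin (post-ictal)"),
   (3, "RPR/VDRL"), (3, "HIV testing"),
   (4, "HbA1c"), (4, "SPEP/UPEP")]
def pvImaging : List (Nat × String) :=
  [(0, "MRI Brain with epilepsy protocol"),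
   (1, "MRI Brain with/without contrast"),
   (2, "MRI Brain"), (2, "DaTscan (if diagnostic uncertainty)"),
   (3, "MRI Brain with volumetric analysis")]
def pvNeuro : List (Nat × String) :=
  [(0, "EEG (routine and/or prolonged)"),
   (3, "Neuropsychological testing"),
   (4, "EMG/Nerve conduction studies")]
def pvOther : List (Nat × String) := [(1, "Headache diary review")]

-- the set comprehension {rule for s in symptoms for kw, rule in _KEYWORD_RULES if kw in s.lower()}
def pvFired (symptoms : List String) : PySem.Set Nat :=
  PySem.Set.ofList (symptoms.flatMap (fun s =>
    pvKeywordRules.filterMap (fun kr =>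
      if PySem.Str.isIn kr.1 (PySem.Str.lower s) then some kr.2 else none)))

def get_workup_recommendations_alt (symptoms : List String) : List (String × List String) :=
  let fired := pvFired symptoms
  let pick := fun (table : List (Nat × String)) =>
    table.filterMap (fun rt => if PySem.Set.contains fired rt.1 then some rt.2 else none)
  [("laboratory",
     ["Complete blood count (CBC)", "Comprehensive metabolic panel",
      "Thyroid function tests", "Vitamin B12 level"] ++ pick pvLabTests),
   ("imaging", pick pvImaging),
   ("neurophysiology", pick pvNeuro),
   ("other", pick pvOther)]

-- ===== PRECONDITION & SPEC =====
def Spec_get_workup_recommendations (symptoms : List String) (out : List (String × List String)) : Prop := out = get_workup_recommendations_alt symptoms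
instance (symptoms : List String) (out : List (String × List String)) : Decidable (Spec_get_workup_recommendations symptoms out) := by unfold Spec_get_workup_recommendations; infer_instance

-- ===== CLAIM (what is proved, stated in full; the proofs are below) =====
def Claim_equal_get_workup_recommendations : Prop := ∀ (symptoms : List String), Dom_get_workup_recommendations symptoms → Spec_get_workup_recommendations symptoms (get_workup_recommendations symptoms)

-- ===== LEMMAS AND PROOFS =====

-- membership in the fired set = A's per-rule any()-condition, one lemma per rule id
theorem pvFired0 (symptoms : List String) :
    PySem.Set.contains (pvFired symptoms) 0
      = (symptoms.map (fun s => PySem.Str.lower s)).any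
          (fun s => PySem.Str.isIn "seizure" s || PySem.Str.isIn "epilepsy" s) := by
  rw [Bool.eq_iff_iff]
  simp [pvFired, pvKeywordRules, PySem.Set.mem_ofList,
    List.mem_flatMap, List.mem_filterMap, List.any_eq_true]

theorem pvFired1 (symptoms : List String) :
    PySem.Set.contains (pvFired symptoms) 1
      = (symptoms.map (fun s => PySem.Str.lower s)).any
          (fun s => PySem.Str.isIn "headache" s || PySem.Str.isIn "migraine" s) := by
  rw [Bool.eq_iff_iff]
  simp [pvFired, pvKeywordRules, PySem.Set.mem_ofList,
    List.mem_flatMap, List.mem_filterMap, List.any_eq_true]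

theorem pvFired2 (symptoms : List String) :
    PySem.Set.contains (pvFired symptoms) 2
      = (symptoms.map (fun s => PySem.Str.lower s)).any
          (fun s => PySem.Str.isIn "tremor" s || PySem.Str.isIn "parkinson" s) := by
  rw [Bool.eq_iff_iff]
  simp [pvFired, pvKeywordRules, PySem.Set.mem_ofList,
    List.mem_flatMap, List.mem_filterMap, List.any_eq_true]

theorem pvFired3 (symptoms : List String) :
    PySem.Set.contains (pvFired symptoms) 3
      = (symptoms.map (fun s => PySem.Str.lower s)).any
          (fun s => PySem.Str.isIn "memory" s || (PySem.Str.isIn "cognitive" s || PySem.Str.isIn "dementia" s)) := by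
  rw [Bool.eq_iff_iff]
  simp [pvFired, pvKeywordRules, PySem.Set.mem_ofList,
    List.mem_flatMap, List.mem_filterMap, List.any_eq_true]

theorem pvFired4 (symptoms : List String) :
    PySem.Set.contains (pvFired symptoms) 4
      = (symptoms.map (fun s => PySem.Str.lower s)).any
          (fun s => PySem.Str.isIn "weakness" s || (PySem.Str.isIn "numbness" s || PySem.Str.isIn "neuropathy" s)) := by
  rw [Bool.eq_iff_iff]
  simp [pvFired, pvKeywordRules, PySem.Set.mem_ofList,
    List.mem_flatMap, List.mem_filterMap, List.any_eq_true]

-- ===== VERDICT (by name: the statement is the Claim_ definition above) =====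
set_option maxHeartbeats 2000000 in
theorem get_workup_recommendations_spec : Claim_equal_get_workup_recommendations := by
  intro symptoms _
  unfold Spec_get_workup_recommendations get_workup_recommendations get_workup_recommendations_alt
  dsimp only [pvLabTests, pvImaging, pvNeuro, pvOther, List.filterMap_cons, List.filterMap_nil]
  rw [pvFired0, pvFired1, pvFired2, pvFired3, pvFired4]
  generalize ((symptoms.map (fun s => PySem.Str.lower s)).any
      (fun s => PySem.Str.isIn "seizure" s || PySem.Str.isIn "epilepsy" s)) = c1
  generalize ((symptoms.map (fun s => PySem.Str.lower s)).any
      (fun s => PySem.Str.isIn "headache" s || PySem.Str.isIn "migraine" s)) = c2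
  generalize ((symptoms.map (fun s => PySem.Str.lower s)).any
      (fun s => PySem.Str.isIn "tremor" s || PySem.Str.isIn "parkinson" s)) = c3
  generalize ((symptoms.map (fun s => PySem.Str.lower s)).any
      (fun s => PySem.Str.isIn "memory" s || (PySem.Str.isIn "cognitive" s || PySem.Str.isIn "dementia" s))) = c4
  generalize ((symptoms.map (fun s => PySem.Str.lower s)).any
      (fun s => PySem.Str.isIn "weakness" s || (PySem.Str.isIn "numbness" s || PySem.Str.isIn "neuropathy" s))) = c5
  cases c1 <;> cases c2 <;> cases c3 <;> cases c4 <;> cases c5 <;> decide
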